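-- pv_equiv track=rewrite | github.com/olliepro/typesetting_lds_scriptures | scriptures/pdf_builder.py | _column_bounds_fill
-- ===== SOURCE A (Python) =====
-- from typing import Dict, List, Sequence, Tuple
--
-- def _column_bounds_fill(weights: Sequence[int], columns: int) -> List[int]:
--     """Sequentially fill columns left-to-right based on weight totals."""
--
--     if not weights:
--         return [0] * (columns + 1)
--     total = sum(weights)
--     target = max(1, -(-total // columns))  # ceiling division
--     bounds = [0]
--     acc = 0
--     for idx, w in enumerate(weights, start=1):
--         acc += w
--         if acc >= target and len(bounds) < columns:
--             bounds.append(idx)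
--             acc = 0
--     bounds.append(len(weights))
--     while len(bounds) < columns + 1:
--         bounds.append(bounds[-1])
--     return bounds[: columns + 1]
-- ===== SOURCE B (Python) =====
-- from typing import List, Sequence
--
--
-- def _column_bounds_fill(weights: Sequence[int], columns: int) -> List[int]:
--     """Prefix-sum version: place each boundary by a first-hit search over cumulative sums."""
--     if not weights:
--         return [0] * (columns + 1)
--     cum = []
--     run = 0
--     for w in weights:
--         run += w
--         cum.append(run)
--     total = cum[-1]
--     target = max(1, -(-total // columns))
--     bounds = [0]
--     last = 0
--     # remaining (index, cumulative sum) pairs, reversed so pop() yields them in order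
--     rem = list(enumerate(cum, start=1))[::-1]
--     for _ in range(columns - 1):
--         idx = None
--         while rem:
--             i, p = rem.pop()
--             if p - last >= target:
--                 idx, last = i, p
--                 break
--         if idx is None:
--             break
--         bounds.append(idx)
--     bounds.append(len(weights))
--     while len(bounds) < columns + 1:
--         bounds.append(bounds[-1])
--     return bounds
-- ===== Notes on version B (the rewrite author's own statement) =====
-- stated objective: alternative
-- what changed: A single-pass accumulate-and-reset loop over the weights is replaced by building the prefix-sum (cumulative) array once and then placing each of the up-to columns-1 boundaries by a first-hit search over the remaining cumulative sums against the last placed cumulative value.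
-- outside the precondition, e.g. on _column_bounds_fill([1], -1): A returns [], B returns [0, 1]; on _column_bounds_fill([1, 2], 0): A raises ZeroDivisionError, B raises ZeroDivisionError
import Mathlib
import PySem

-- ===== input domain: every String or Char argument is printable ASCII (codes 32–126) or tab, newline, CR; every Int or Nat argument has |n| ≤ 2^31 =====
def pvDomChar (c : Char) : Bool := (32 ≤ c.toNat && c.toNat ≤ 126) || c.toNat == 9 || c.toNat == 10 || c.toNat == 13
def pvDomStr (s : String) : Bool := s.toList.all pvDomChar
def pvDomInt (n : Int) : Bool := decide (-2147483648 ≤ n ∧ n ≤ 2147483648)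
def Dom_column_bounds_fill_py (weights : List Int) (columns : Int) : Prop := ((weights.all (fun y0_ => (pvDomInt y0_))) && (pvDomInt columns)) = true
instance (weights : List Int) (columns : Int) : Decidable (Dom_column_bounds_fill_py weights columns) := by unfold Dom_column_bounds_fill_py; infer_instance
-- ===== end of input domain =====

-- B replaces A's single accumulate-and-reset pass with a prefix-sum array plus a per-boundary
-- first-hit search (alternative decomposition, same cost); return values agree for columns >= 1.


-- ===== PORT A =====
-- 'while len(bounds) < n: bounds.append(bounds[-1])' (shared verbatim by both Pythons' tails)
def padLoop (n : Nat) (xs : List Int) : List Int :=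
  if _h : xs.length < n then padLoop n (xs ++ [xs.getLastD 0]) else xs
  termination_by n - xs.length
  decreasing_by simp; omega

def column_bounds_fill_py (weights : List Int) (columns : Int) : List Int :=
  if weights = [] then List.replicate (columns + 1).toNat 0
  else
    let total := weights.sum
    let target := max 1 (-(PySem.Int.floordiv (-total) columns))
    let st := (PySem.List.enumerate weights 1).foldl
      (fun (st : List Int × Int) p =>
        let acc := st.2 + p.2
        if acc ≥ target ∧ (st.1.length : Int) < columns then (st.1 ++ [p.1], 0) else (st.1, acc))
      ([0], 0)
    let bounds := st.1 ++ [(weights.length : Int)]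
    PySem.List.slice (padLoop (columns + 1).toNat bounds) none (some (columns + 1))

-- ===== PORT B =====
-- inner 'while rem: i, p = rem.pop(); if p - last >= target: …; break' — Python keeps rem
-- REVERSED so pop() yields pairs in forward order; ported over the forward list, pop = head
def findSplit (last target : Int) : List (Int × Int) → Option (Int × Int × List (Int × Int))
  | [] => none
  | (i, p) :: rest => if p - last ≥ target then some (i, p, rest) else findSplit last target rest

-- outer 'for _ in range(columns - 1)' placing one boundary per iteration
def bLoop (target : Int) : Nat → List Int → Int → List (Int × Int) → List Int
  | 0, bounds, _, _ => bounds
  | fuel + 1, bounds, last, remaining =>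
    match findSplit last target remaining with
    | none => bounds
    | some (i, p, rest) => bLoop target fuel (bounds ++ [i]) p rest

def column_bounds_fill_py_alt (weights : List Int) (columns : Int) : List Int :=
  if weights = [] then List.replicate (columns + 1).toNat 0
  else
    let cum := (weights.foldl (fun (st : List Int × Int) w =>
        (st.1 ++ [st.2 + w], st.2 + w)) ([], 0)).1
    let total := PySem.List.pyGetD cum (-1) 0
    let target := max 1 (-(PySem.Int.floordiv (-total) columns))
    -- rem = list(enumerate(cum, start=1))[::-1]; consumed by pop() ⇒ the forward enumerate list
    let bounds := bLoop target (columns - 1).toNat [0] 0 (PySem.List.enumerate cum 1)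
    padLoop (columns + 1).toNat (bounds ++ [(weights.length : Int)])

-- ===== PRECONDITION & SPEC =====
-- Pre_ excludes columns ≤ 0: for nonempty weights and columns = 0 A raises ZeroDivisionError, and for
-- negative columns A's empty/truncated results are artefacts of Python's negative slice bound and
-- negative list multiplication, not column layouts anyone would specify.
def Pre_column_bounds_fill_py (weights : List Int) (columns : Int) : Prop := 1 ≤ columns
instance (weights : List Int) (columns : Int) : Decidable (Pre_column_bounds_fill_py weights columns) := by unfold Pre_column_bounds_fill_py; infer_instance

def pvWitness_column_bounds_fill_py : List Int × Int := ([3, 1, 4, 1, 5], 3)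

def Spec_column_bounds_fill_py (weights : List Int) (columns : Int) (out : List Int) : Prop := out = column_bounds_fill_py_alt weights columns
instance (weights : List Int) (columns : Int) (out : List Int) : Decidable (Spec_column_bounds_fill_py weights columns out) := by unfold Spec_column_bounds_fill_py; infer_instance

-- ===== CLAIM (what is proved, stated in full; the proofs are below) =====
def Claim_equal_column_bounds_fill_py : Prop := ∀ (weights : List Int) (columns : Int), Dom_column_bounds_fill_py weights columns → Pre_column_bounds_fill_py weights columns → Spec_column_bounds_fill_py weights columns (column_bounds_fill_py weights columns)

-- ===== LEMMAS AND PROOFS =====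

-- proof-side model of the cum list B builds, and of its enumerated form
def cumList (b : Int) : List Int → List Int
  | [] => []
  | w :: ws => (b + w) :: cumList (b + w) ws

def cumP (i b : Int) : List Int → List (Int × Int)
  | [] => []
  | w :: ws => (i, b + w) :: cumP (i + 1) (b + w) ws

theorem cumFoldl (ws : List Int) : ∀ (acc : List Int) (run : Int),
    (ws.foldl (fun (st : List Int × Int) w => (st.1 ++ [st.2 + w], st.2 + w)) (acc, run)).1
      = acc ++ cumList run ws := by
  induction ws with
  | nil => intro acc run; simp [cumList]
  | cons w ws ih => intro acc run; simp [cumList, ih, List.append_assoc]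

theorem enum_cum (ws : List Int) : ∀ (i b : Int),
    PySem.List.enumerate (cumList b ws) i = cumP i b ws := by
  induction ws with
  | nil => intro i b; simp [cumList, cumP, PySem.List.enumerate_nil]
  | cons w ws ih => intro i b; simp [cumList, cumP, PySem.List.enumerate_cons, ih]

theorem cumList_last (ws : List Int) : ∀ (b : Int), ws ≠ [] →
    (cumList b ws).getLast? = some (b + ws.sum) := by
  induction ws with
  | nil => simp
  | cons w ws ih =>
    intro b _
    cases hws : ws with
    | nil => simp [cumList]
    | cons v vs =>
      have h := ih (b + w) (by simp [hws])
      rw [hws] at h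
      simp only [cumList, List.sum_cons] at h ⊢
      rw [List.getLast?_cons_cons, h]
      ring_nf

theorem cumList_ne_nil (ws : List Int) (b : Int) (h : ws ≠ []) : cumList b ws ≠ [] := by
  cases ws with
  | nil => exact absurd rfl h
  | cons w ws => simp [cumList]

theorem bLoop_nil (t : Int) (fuel : Nat) (bounds : List Int) (last : Int) :
    bLoop t fuel bounds last [] = bounds := by
  cases fuel <;> simp [bLoop, findSplit]

theorem bLoop_cons_skip (t : Int) (f : Nat) (bounds : List Int) (last i p : Int)
    (cs : List (Int × Int)) (h : ¬ p - last ≥ t) :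
    bLoop t (f + 1) bounds last ((i, p) :: cs) = bLoop t (f + 1) bounds last cs := by
  simp [bLoop, findSplit, h]

theorem bLoop_len (t : Int) : ∀ (fuel : Nat) (bounds : List Int) (last : Int)
    (rem : List (Int × Int)), (bLoop t fuel bounds last rem).length ≤ bounds.length + fuel := by
  intro fuel
  induction fuel with
  | zero => intro bounds last rem; simp [bLoop]
  | succ f ih =>
    intro bounds last rem
    rw [bLoop]
    cases h : findSplit last t rem with
    | none => simp
    | some x =>
      obtain ⟨i, p, rest⟩ := x
      have := ih (bounds ++ [i]) p rest
      simp at this ⊢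
      omega

theorem aLoop_cap (t c : Int) (ws : List Int) : ∀ (i : Int) (bounds : List Int) (acc : Int),
    c ≤ (bounds.length : Int) →
    ((PySem.List.enumerate ws i).foldl
      (fun (st : List Int × Int) p =>
        let a := st.2 + p.2
        if a ≥ t ∧ (st.1.length : Int) < c then (st.1 ++ [p.1], 0) else (st.1, a))
      (bounds, acc)).1 = bounds := by
  induction ws with
  | nil => intro i bounds acc _; simp [PySem.List.enumerate_nil]
  | cons w ws ih =>
    intro i bounds acc hc
    rw [PySem.List.enumerate_cons, List.foldl_cons]
    have hlt : ¬ ((bounds.length : Int) < c) := by omega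
    simp only [hlt, and_false, if_false]
    exact ih (i + 1) bounds (acc + w) hc

theorem main_loop (t c : Int) (ws : List Int) : ∀ (i : Int) (fuel : Nat)
    (bounds : List Int) (acc last : Int), (bounds.length : Int) + fuel = c →
    ((PySem.List.enumerate ws i).foldl
      (fun (st : List Int × Int) p =>
        let a := st.2 + p.2
        if a ≥ t ∧ (st.1.length : Int) < c then (st.1 ++ [p.1], 0) else (st.1, a))
      (bounds, acc)).1
      = bLoop t fuel bounds last (cumP i (last + acc) ws) := by
  induction ws with
  | nil => intro i fuel bounds acc last _; simp [PySem.List.enumerate_nil, cumP, bLoop_nil]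
  | cons w ws ih =>
    intro i fuel bounds acc last hlen
    rw [PySem.List.enumerate_cons, List.foldl_cons]
    simp only [cumP]
    cases fuel with
    | zero =>
      have hc : c ≤ (bounds.length : Int) := by omega
      have hlt : ¬ ((bounds.length : Int) < c) := by omega
      simp only [hlt, and_false, if_false, bLoop]
      exact aLoop_cap t c ws (i + 1) bounds (acc + w) hc
    | succ f =>
      by_cases h : acc + w ≥ t
      · have hlt : (bounds.length : Int) < c := by omega
        have hp : last + acc + w - last ≥ t := by omega
        simp only [h, hlt, and_true, if_pos]
        rw [bLoop]
        simp only [findSplit, if_pos hp]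
        have := ih (i + 1) f (bounds ++ [i]) 0 (last + acc + w)
          (by simp; omega)
        simpa using this
      · have hp : ¬ (last + acc + w - last ≥ t) := by omega
        simp only [h, false_and, if_false]
        rw [bLoop_cons_skip t f bounds last i (last + acc + w) _ hp]
        have := ih (i + 1) (f + 1) bounds (acc + w) last hlen
        rw [this]
        ring_nf

theorem padLoop_length (n : Nat) (xs : List Int) (h : xs.length ≤ n) :
    (padLoop n xs).length = n := by
  rw [padLoop]
  by_cases hl : xs.length < n
  · rw [dif_pos hl]
    exact padLoop_length n (xs ++ [xs.getLastD 0]) (by simp; omega)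
  · rw [dif_neg hl]; omega
  termination_by n - xs.length
  decreasing_by simp; omega

-- ===== VERDICT (by name: the statement is the Claim_ definition above) =====
theorem column_bounds_fill_py_spec : Claim_equal_column_bounds_fill_py := by
  intro weights columns _ hpre
  unfold Spec_column_bounds_fill_py
  unfold column_bounds_fill_py column_bounds_fill_py_alt
  by_cases hw : weights = []
  · simp [hw]
  · simp only [hw, if_false]
    have hc : (1:Int) ≤ columns := hpre
    -- cum list
    have hcum : (weights.foldl (fun (st : List Int × Int) w =>
        (st.1 ++ [st.2 + w], st.2 + w)) ([], 0)).1 = cumList 0 weights := by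
      simpa using cumFoldl weights [] 0
    rw [hcum]
    -- total
    have htot : PySem.List.pyGetD (cumList 0 weights) (-1) 0 = weights.sum := by
      have hne := cumList_ne_nil weights 0 hw
      rw [PySem.List.pyGetD_neg_one _ _ hne]
      have h1 := cumList_last weights 0 hw
      rw [List.getLast?_eq_some_getLast hne] at h1
      have h2 : (cumList 0 weights).getLast hne = 0 + weights.sum := Option.some.inj h1
      omega
    rw [htot]
    set t := max 1 (-(PySem.Int.floordiv (-weights.sum) columns)) with ht
    -- main loops agree
    have hfuel : ((([0] : List Int).length : Int)) + ((columns - 1).toNat : Nat) = columns := by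
      simp; omega
    have hmain := main_loop t columns weights 1 (columns - 1).toNat [0] 0 0 hfuel
    rw [enum_cum]
    have hz : (0 : Int) + 0 = 0 := by omega
    rw [hz] at hmain
    rw [hmain]
    set bs := bLoop t (columns - 1).toNat [0] 0 (cumP 1 0 weights) with hbs
    have hlenbs : (bs.length : Int) ≤ columns := by
      rw [hbs]
      have h2 := bLoop_len t (columns - 1).toNat [0] 0 (cumP 1 0 weights)
      have h3 : ([0] : List Int).length = 1 := rfl
      omega
    have hpad : (padLoop (columns + 1).toNat (bs ++ [(weights.length : Int)])).length
        = (columns + 1).toNat := by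
      apply padLoop_length
      simp
      omega
    rw [PySem.List.slice_to _ (by omega : (0:Int) ≤ columns + 1)]
    exact List.take_of_length_le (le_of_eq hpad)
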